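-- pv_equiv track=rewrite | github.com/settle14/Exo-Sim | tools/muscle_activation_analysis.py | group_muscles_by_function
-- ===== SOURCE A (Python) =====
-- from typing import Tuple, Dict, List
--
-- def group_muscles_by_function(muscle_names: List[str]) -> Dict[str, List[str]]:
--     """
--     Group muscles by functional categories for EMG-like analysis
--     """
--     groups = {
--         'hip_flexors': [],
--         'hip_extensors': [],
--         'hip_abductors': [],
--         'hip_adductors': [],
--         'knee_extensors': [],
--         'knee_flexors': [],
--         'ankle_plantarflexors': [],
--         'ankle_dorsiflexors': [],
--         'other': []
--     }
--
--     for muscle in muscle_names: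
--         muscle_lower = muscle.lower()
--
--         # Hip flexors
--         if any(x in muscle_lower for x in ['psoas', 'iliacus', 'rectus_femoris', 'recfem', 'tfl', 'sart']):
--             groups['hip_flexors'].append(muscle)
--         # Hip extensors
--         elif any(x in muscle_lower for x in ['glmax', 'glut', 'semiten', 'semimem', 'bflh', 'bfsh']):
--             groups['hip_extensors'].append(muscle)
--         # Hip abductors
--         elif any(x in muscle_lower for x in ['glmed', 'glmin', 'tfl']):
--             groups['hip_abductors'].append(muscle)
--         # Hip adductors
--         elif any(x in muscle_lower for x in ['addbrev', 'addlong', 'addmag', 'grac', 'pect']):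
--             groups['hip_adductors'].append(muscle)
--         # Knee extensors
--         elif any(x in muscle_lower for x in ['vasmed', 'vaslat', 'vasint', 'recfem']):
--             groups['knee_extensors'].append(muscle)
--         # Knee flexors
--         elif any(x in muscle_lower for x in ['semiten', 'semimem', 'bflh', 'bfsh', 'gaslat', 'gasmed']):
--             groups['knee_flexors'].append(muscle)
--         # Ankle plantarflexors
--         elif any(x in muscle_lower for x in ['gaslat', 'gasmed', 'soleus', 'tibpost']):
--             groups['ankle_plantarflexors'].append(muscle)
--         # Ankle dorsiflexors
--         elif any(x in muscle_lower for x in ['tibant']):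
--             groups['ankle_dorsiflexors'].append(muscle)
--         else:
--             groups['other'].append(muscle)
--
--     # Remove empty groups
--     groups = {k: v for k, v in groups.items() if v}
--     return groups
-- ===== SOURCE B (Python) =====
-- from typing import Dict, List
--
-- TABLE = [
--     ('hip_flexors', ['psoas', 'iliacus', 'rectus_femoris', 'recfem', 'tfl', 'sart']),
--     ('hip_extensors', ['glmax', 'glut', 'semiten', 'semimem', 'bflh', 'bfsh']),
--     ('hip_abductors', ['glmed', 'glmin', 'tfl']),
--     ('hip_adductors', ['addbrev', 'addlong', 'addmag', 'grac', 'pect']),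
--     ('knee_extensors', ['vasmed', 'vaslat', 'vasint', 'recfem']),
--     ('knee_flexors', ['semiten', 'semimem', 'bflh', 'bfsh', 'gaslat', 'gasmed']),
--     ('ankle_plantarflexors', ['gaslat', 'gasmed', 'soleus', 'tibpost']),
--     ('ankle_dorsiflexors', ['tibant']),
-- ]
--
-- ORDER = [cat for cat, _ in TABLE] + ['other']
--
--
-- def _classify(muscle: str) -> str:
--     ml = muscle.lower()
--     for cat, kws in TABLE:
--         if any(k in ml for k in kws):
--             return cat
--     return 'other'
--
--
-- def group_muscles_by_function(muscle_names: List[str]) -> Dict[str, List[str]]: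
--     result = {}
--     for cat in ORDER:
--         members = [m for m in muscle_names if _classify(m) == cat]
--         if members:
--             result[cat] = members
--     return result
-- ===== Notes on version B (the rewrite author's own statement) =====
-- stated objective: idiomatic
-- what changed: Replaces the 9-way if/elif chain appending into a pre-built dict of lists by a data-driven (category, keywords) table with a first-match classifier, building the result per category by filtering the input list, so non-empty groups appear directly in canonical order.
import Mathlib
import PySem

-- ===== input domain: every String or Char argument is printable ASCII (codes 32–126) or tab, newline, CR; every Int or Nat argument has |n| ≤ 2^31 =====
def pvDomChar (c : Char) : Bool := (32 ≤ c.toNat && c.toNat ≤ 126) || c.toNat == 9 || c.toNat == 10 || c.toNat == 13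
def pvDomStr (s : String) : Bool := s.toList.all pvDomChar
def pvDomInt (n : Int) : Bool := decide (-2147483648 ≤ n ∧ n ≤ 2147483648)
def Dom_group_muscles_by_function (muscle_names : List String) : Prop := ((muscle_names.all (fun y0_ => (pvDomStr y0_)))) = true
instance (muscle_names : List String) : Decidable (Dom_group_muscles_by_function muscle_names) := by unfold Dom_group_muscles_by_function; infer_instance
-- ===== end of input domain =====

-- B replaces A's 9-way if/elif chain over a pre-built dict of lists by a data-driven
-- (category, keywords) table with a first-match classifier and a per-category filter (idiomatic rewrite).


-- ===== PORT A =====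
-- literal port: dict of 9 empty groups, an if/elif chain appending into it
-- (groups[k].append(m) = Dict.modify k [] (· ++ [m])), then the dict comprehension dropping
-- empty groups (keys are unique, so it is the filtered items list in order).
def group_muscles_by_function (muscle_names : List String) : List (String × List String) :=
  let groups : PySem.Dict String (List String) := PySem.Dict.ofList
    [("hip_flexors", []), ("hip_extensors", []), ("hip_abductors", []), ("hip_adductors", []),
     ("knee_extensors", []), ("knee_flexors", []), ("ankle_plantarflexors", []),
     ("ankle_dorsiflexors", []), ("other", [])]
  let groups := muscle_names.foldl (fun groups muscle =>
    let muscle_lower := PySem.Str.lower muscle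
    if ["psoas", "iliacus", "rectus_femoris", "recfem", "tfl", "sart"].any (fun x => PySem.Str.isIn x muscle_lower) then
      groups.modify "hip_flexors" [] (· ++ [muscle])
    else if ["glmax", "glut", "semiten", "semimem", "bflh", "bfsh"].any (fun x => PySem.Str.isIn x muscle_lower) then
      groups.modify "hip_extensors" [] (· ++ [muscle])
    else if ["glmed", "glmin", "tfl"].any (fun x => PySem.Str.isIn x muscle_lower) then
      groups.modify "hip_abductors" [] (· ++ [muscle])
    else if ["addbrev", "addlong", "addmag", "grac", "pect"].any (fun x => PySem.Str.isIn x muscle_lower) then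
      groups.modify "hip_adductors" [] (· ++ [muscle])
    else if ["vasmed", "vaslat", "vasint", "recfem"].any (fun x => PySem.Str.isIn x muscle_lower) then
      groups.modify "knee_extensors" [] (· ++ [muscle])
    else if ["semiten", "semimem", "bflh", "bfsh", "gaslat", "gasmed"].any (fun x => PySem.Str.isIn x muscle_lower) then
      groups.modify "knee_flexors" [] (· ++ [muscle])
    else if ["gaslat", "gasmed", "soleus", "tibpost"].any (fun x => PySem.Str.isIn x muscle_lower) then
      groups.modify "ankle_plantarflexors" [] (· ++ [muscle])
    else if ["tibant"].any (fun x => PySem.Str.isIn x muscle_lower) then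
      groups.modify "ankle_dorsiflexors" [] (· ++ [muscle])
    else
      groups.modify "other" [] (· ++ [muscle])) groups
  groups.items.filter (fun kv => !kv.2.isEmpty)

-- ===== PORT B =====
def pvTable : List (String × List String) :=
  [("hip_flexors", ["psoas", "iliacus", "rectus_femoris", "recfem", "tfl", "sart"]),
   ("hip_extensors", ["glmax", "glut", "semiten", "semimem", "bflh", "bfsh"]),
   ("hip_abductors", ["glmed", "glmin", "tfl"]),
   ("hip_adductors", ["addbrev", "addlong", "addmag", "grac", "pect"]),
   ("knee_extensors", ["vasmed", "vaslat", "vasint", "recfem"]),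
   ("knee_flexors", ["semiten", "semimem", "bflh", "bfsh", "gaslat", "gasmed"]),
   ("ankle_plantarflexors", ["gaslat", "gasmed", "soleus", "tibpost"]),
   ("ankle_dorsiflexors", ["tibant"])]

def pvOrder : List String := pvTable.map (·.1) ++ ["other"]

-- the for-loop of _classify, returning on the first matching row
def pvClassifyGo (tbl : List (String × List String)) (ml : String) : String :=
  match tbl with
  | [] => "other"
  | (cat, kws) :: rest => if kws.any (fun k => PySem.Str.isIn k ml) then cat else pvClassifyGo rest ml

def pvClassify (muscle : String) : String := pvClassifyGo pvTable (PySem.Str.lower muscle)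

-- result dict built by inserting fresh keys in canonical order, skipping empty member lists
def group_muscles_by_function_alt (muscle_names : List String) : List (String × List String) :=
  (pvOrder.foldl (fun result cat =>
      let members := muscle_names.filter (fun m => pvClassify m == cat)
      if members.isEmpty then result else result.insert cat members)
    PySem.Dict.empty).items

-- ===== PRECONDITION & SPEC =====
def Spec_group_muscles_by_function (muscle_names : List String) (out : List (String × List String)) : Prop := out = group_muscles_by_function_alt muscle_names
instance (muscle_names : List String) (out : List (String × List String)) : Decidable (Spec_group_muscles_by_function muscle_names out) := by unfold Spec_group_muscles_by_function; infer_instance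

-- ===== CLAIM (what is proved, stated in full; the proofs are below) =====
def Claim_equal_group_muscles_by_function : Prop := ∀ (muscle_names : List String), Dom_group_muscles_by_function muscle_names → Spec_group_muscles_by_function muscle_names (group_muscles_by_function muscle_names)

-- ===== LEMMAS AND PROOFS =====

-- A's if/elif chain is exactly 'modify at the first-match category'
theorem pv_stepA_eq (d : PySem.Dict String (List String)) (muscle : String) :
    (let muscle_lower := PySem.Str.lower muscle
     if ["psoas", "iliacus", "rectus_femoris", "recfem", "tfl", "sart"].any (fun x => PySem.Str.isIn x muscle_lower) then
       d.modify "hip_flexors" [] (· ++ [muscle])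
     else if ["glmax", "glut", "semiten", "semimem", "bflh", "bfsh"].any (fun x => PySem.Str.isIn x muscle_lower) then
       d.modify "hip_extensors" [] (· ++ [muscle])
     else if ["glmed", "glmin", "tfl"].any (fun x => PySem.Str.isIn x muscle_lower) then
       d.modify "hip_abductors" [] (· ++ [muscle])
     else if ["addbrev", "addlong", "addmag", "grac", "pect"].any (fun x => PySem.Str.isIn x muscle_lower) then
       d.modify "hip_adductors" [] (· ++ [muscle])
     else if ["vasmed", "vaslat", "vasint", "recfem"].any (fun x => PySem.Str.isIn x muscle_lower) then
       d.modify "knee_extensors" [] (· ++ [muscle])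
     else if ["semiten", "semimem", "bflh", "bfsh", "gaslat", "gasmed"].any (fun x => PySem.Str.isIn x muscle_lower) then
       d.modify "knee_flexors" [] (· ++ [muscle])
     else if ["gaslat", "gasmed", "soleus", "tibpost"].any (fun x => PySem.Str.isIn x muscle_lower) then
       d.modify "ankle_plantarflexors" [] (· ++ [muscle])
     else if ["tibant"].any (fun x => PySem.Str.isIn x muscle_lower) then
       d.modify "ankle_dorsiflexors" [] (· ++ [muscle])
     else
       d.modify "other" [] (· ++ [muscle]))
    = d.modify (pvClassify muscle) [] (· ++ [muscle]) := by
  simp only [pvClassify, pvTable, pvClassifyGo]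
  split_ifs <;> rfl

theorem pv_classify_mem (m : String) : pvClassify m ∈ pvOrder := by
  simp only [pvClassify, pvTable, pvClassifyGo, pvOrder]
  split_ifs <;> simp

-- characterization of A: non-empty groups, in canonical order, each the filter of its category
theorem pv_A_char (names : List String) :
    group_muscles_by_function names
      = (pvOrder.map (fun c => (c, names.filter (fun m => pvClassify m == c)))).filter
          (fun kv => !kv.2.isEmpty) := by
  unfold group_muscles_by_function
  have hstep : (fun (d : PySem.Dict String (List String)) (muscle : String) =>
      (let muscle_lower := PySem.Str.lower muscle
       if ["psoas", "iliacus", "rectus_femoris", "recfem", "tfl", "sart"].any (fun x => PySem.Str.isIn x muscle_lower) then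
         d.modify "hip_flexors" [] (· ++ [muscle])
       else if ["glmax", "glut", "semiten", "semimem", "bflh", "bfsh"].any (fun x => PySem.Str.isIn x muscle_lower) then
         d.modify "hip_extensors" [] (· ++ [muscle])
       else if ["glmed", "glmin", "tfl"].any (fun x => PySem.Str.isIn x muscle_lower) then
         d.modify "hip_abductors" [] (· ++ [muscle])
       else if ["addbrev", "addlong", "addmag", "grac", "pect"].any (fun x => PySem.Str.isIn x muscle_lower) then
         d.modify "hip_adductors" [] (· ++ [muscle])
       else if ["vasmed", "vaslat", "vasint", "recfem"].any (fun x => PySem.Str.isIn x muscle_lower) then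
         d.modify "knee_extensors" [] (· ++ [muscle])
       else if ["semiten", "semimem", "bflh", "bfsh", "gaslat", "gasmed"].any (fun x => PySem.Str.isIn x muscle_lower) then
         d.modify "knee_flexors" [] (· ++ [muscle])
       else if ["gaslat", "gasmed", "soleus", "tibpost"].any (fun x => PySem.Str.isIn x muscle_lower) then
         d.modify "ankle_plantarflexors" [] (· ++ [muscle])
       else if ["tibant"].any (fun x => PySem.Str.isIn x muscle_lower) then
         d.modify "ankle_dorsiflexors" [] (· ++ [muscle])
       else
         d.modify "other" [] (· ++ [muscle])))
      = fun d muscle => d.modify (pvClassify muscle) [] (· ++ [muscle]) := by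
    funext d muscle; exact pv_stepA_eq d muscle
  rw [hstep]
  dsimp only
  set d0 : PySem.Dict String (List String) := PySem.Dict.ofList
    [("hip_flexors", []), ("hip_extensors", []), ("hip_abductors", []), ("hip_adductors", []),
     ("knee_extensors", []), ("knee_flexors", []), ("ankle_plantarflexors", []),
     ("ankle_dorsiflexors", []), ("other", [])] with hd0
  have hkeys0 : d0.keys = pvOrder := by rw [hd0]; rfl
  have hnd : (names.foldl (fun d muscle => d.modify (pvClassify muscle) [] (· ++ [muscle])) d0).keys.Nodup :=
    PySem.Dict.nodup_keys_foldl_modify_key names pvClassify [] (fun _ muscle v => v ++ [muscle]) _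
      (by rw [hkeys0]; decide)
  rw [PySem.Dict.items_eq_map_keys _ hnd []]
  have hkeys : (names.foldl (fun d muscle => d.modify (pvClassify muscle) [] (· ++ [muscle])) d0).keys = pvOrder := by
    rw [PySem.Dict.keys_foldl_modify_key names pvClassify [] (fun _ muscle v => v ++ [muscle]),
        hkeys0, PySem.Set.update_eq_append_filter]
    have hf : List.filter (fun y => !(PySem.Set.contains pvOrder y))
        (PySem.Set.ofList (names.map pvClassify)) = [] := by
      rw [List.filter_eq_nil_iff]
      intro y hy
      obtain ⟨m, _, rfl⟩ := List.mem_map.mp ((PySem.Set.mem_ofList _ _).mp hy)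
      simp
      exact pv_classify_mem m
    rw [hf]
    rfl
  rw [hkeys]
  congr 1
  apply List.map_congr_left
  intro k hk
  have hgetD : (names.foldl (fun d muscle => d.modify (pvClassify muscle) [] (· ++ [muscle])) d0).getD k []
      = d0.getD k [] ++ names.filter (fun m => pvClassify m == k) := by
    rw [show (names.foldl (fun d muscle => d.modify (pvClassify muscle) [] (· ++ [muscle])) d0)
        = ((names.map (fun m => (pvClassify m, m))).foldl (fun d p => d.modify p.1 [] (· ++ [p.2])) d0)
      from by rw [List.foldl_map]]
    rw [PySem.Dict.getD_foldl_modify_append]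
    congr 1
    rw [List.filter_map]
    simp [Function.comp_def]
  rw [hgetD]
  have hk' : k ∈ ["hip_flexors", "hip_extensors", "hip_abductors", "hip_adductors",
      "knee_extensors", "knee_flexors", "ankle_plantarflexors", "ankle_dorsiflexors", "other"] := by
    simpa [pvOrder, pvTable] using hk
  have hk0 : d0.getD k [] = [] := by
    fin_cases hk' <;> (rw [hd0]; rfl)
  rw [hk0]
  rfl

-- fold of B: inserting fresh distinct keys in order, skipping empties, appends exactly the filterMap
theorem pv_B_fold (names : List String) :
    ∀ (cats : List String) (d : PySem.Dict String (List String)),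
      cats.Nodup → (∀ c ∈ cats, d.contains c = false) →
      (cats.foldl (fun result cat =>
          let members := names.filter (fun m => pvClassify m == cat)
          if members.isEmpty then result else result.insert cat members) d).items
        = d.items ++ cats.filterMap (fun c =>
            if (names.filter (fun m => pvClassify m == c)).isEmpty then none
            else some (c, names.filter (fun m => pvClassify m == c))) := by
  intro cats
  induction cats with
  | nil => intro d _ _; simp
  | cons c rest ih =>
      intro d hnd hfresh
      simp only [List.foldl_cons, List.filterMap_cons]
      cases h : (names.filter (fun m => pvClassify m == c)).isEmpty
      · -- non-empty: insert a fresh key, which appends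
        simp only [Bool.false_eq_true, if_false]
        rw [ih _ (List.Nodup.of_cons hnd) ?_]
        · rw [PySem.Dict.items_insert_of_not_contains _ _ (hfresh c (by simp))]
          simp
        · intro c' hc'
          rw [PySem.Dict.contains_insert]
          have hne : c' ≠ c := by
            intro hEq; subst hEq
            exact (List.nodup_cons.mp hnd).1 hc'
          simp [hne, hfresh c' (List.mem_cons_of_mem _ hc')]
      · -- empty members: skip
        simp only [if_true]
        rw [ih _ (List.Nodup.of_cons hnd) (fun c' hc' => hfresh c' (List.mem_cons_of_mem _ hc'))]

theorem pv_map_filter_eq_filterMap (names : List String) (cats : List String) :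
    (cats.map (fun c => (c, names.filter (fun m => pvClassify m == c)))).filter
        (fun kv => !kv.2.isEmpty)
      = cats.filterMap (fun c =>
          if (names.filter (fun m => pvClassify m == c)).isEmpty then none
          else some (c, names.filter (fun m => pvClassify m == c))) := by
  induction cats with
  | nil => rfl
  | cons c rest ih =>
      simp only [List.map_cons, List.filter_cons, List.filterMap_cons]
      cases h : (names.filter (fun m => pvClassify m == c)).isEmpty
      · simp [ih]
      · simp [ih]

-- ===== VERDICT (by name: the statement is the Claim_ definition above) =====
theorem group_muscles_by_function_spec : Claim_equal_group_muscles_by_function := by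
  intro names _
  unfold Spec_group_muscles_by_function group_muscles_by_function_alt
  rw [pv_A_char, pv_map_filter_eq_filterMap,
      pv_B_fold names pvOrder PySem.Dict.empty (by decide) (by intro c _; simp [pysem])]
  rfl
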